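-- pv_equiv track=rewrite | github.com/BuChiYu-JoJo/Python_cangku | thordata/wuxian_dazhou-cn.py | make_workload
-- ===== SOURCE A (Python) =====
-- from typing import Dict, Tuple, Optional
--
-- def make_workload(continent_requests: Dict[str, int]) -> list:
--     """
--     将 {continent: count} 展平为任务序列（轮询排布）。
--     """
--     seq = []
--     remaining = continent_requests.copy()
--     while any(v > 0 for v in remaining.values()):
--         for cont in list(remaining.keys()):
--             if remaining[cont] > 0:
--                 seq.append(cont)
--                 remaining[cont] -= 1
--     return seq
-- ===== SOURCE B (Python) =====
-- def make_workload(continent_requests):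
--     """
--     将 {continent: count} 展平为任务序列（轮询排布）。
--     Bucket distribution: one pass over the dict puts each continent into the
--     buckets of the rounds it appears in (continent c with count n goes into
--     buckets 0..n-1); concatenating the buckets gives the round-robin order,
--     because bucket r holds exactly the continents with count > r, in dict order.
--     """
--     rounds = []
--     for cont, n in continent_requests.items():
--         for r in range(n):
--             if r == len(rounds):
--                 rounds.append([])
--             rounds[r].append(cont)
--     return [c for bucket in rounds for c in bucket]
-- ===== Notes on version B (the rewrite author's own statement) =====
-- stated objective: alternative
-- what changed: B replaces A's round-major while-loop over a mutated 'remaining' dict by a single continent-major pass that distributes each continent into per-round buckets (continent with count n goes into buckets 0..n-1) and then concatenates the buckets; this transposes the traversal order and is correct because bucket r holds exactly the continents with count > r in dict order, which is A's r-th round.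
import Mathlib
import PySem

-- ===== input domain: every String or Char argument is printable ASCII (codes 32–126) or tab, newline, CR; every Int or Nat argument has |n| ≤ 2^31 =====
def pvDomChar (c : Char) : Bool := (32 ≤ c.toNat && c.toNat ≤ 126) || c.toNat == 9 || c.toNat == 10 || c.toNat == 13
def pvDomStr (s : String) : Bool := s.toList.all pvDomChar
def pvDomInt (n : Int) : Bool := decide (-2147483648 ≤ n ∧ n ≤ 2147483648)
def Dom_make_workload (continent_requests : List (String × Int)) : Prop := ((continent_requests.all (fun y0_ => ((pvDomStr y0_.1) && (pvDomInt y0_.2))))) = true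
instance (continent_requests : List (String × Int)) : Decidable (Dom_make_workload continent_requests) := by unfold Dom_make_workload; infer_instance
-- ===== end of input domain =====

-- B replaces A's round-major rescan of a mutated dict by one continent-major pass that
-- distributes each continent into per-round buckets and concatenates them (objective: alternative).

-- ===== PORT A =====
-- one inner-loop step: `if remaining[cont] > 0: seq.append(cont); remaining[cont] -= 1`
-- (`remaining[cont]` / `-= 1` as getD/modify with default 0: exact because cont is drawn from remaining.keys())
def aStep (st : List String × PySem.Dict String Int) (cont : String) : List String × PySem.Dict String Int :=
  if st.2.getD cont 0 > 0 then (st.1 ++ [cont], st.2.modify cont 0 (fun v => v - 1)) else st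

def aMeasure (d : PySem.Dict String Int) : Nat := (d.values.map Int.toNat).sum

-- the `while any(v > 0 ...)` loop; the fuel argument is a totality guard only:
-- fuel = aMeasure + 1 is never exhausted on inputs with distinct keys (Pre_)
def aLoop : Nat → List String → PySem.Dict String Int → List String
  | 0, seq, _ => seq
  | fuel+1, seq, rem =>
    if rem.values.any (fun v => decide (0 < v)) then
      let st := rem.keys.foldl aStep (seq, rem)
      aLoop fuel st.1 st.2
    else seq

def make_workload (continent_requests : List (String × Int)) : List String :=
  aLoop (aMeasure ⟨continent_requests⟩ + 1) [] ⟨continent_requests⟩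

-- ===== PORT B =====
-- inner-loop body: `if r == len(rounds): rounds.append([])` then `rounds[r].append(cont)`;
-- r is drawn from range(n), so 0 ≤ r, and after the extension r < len(rounds): .toNat/set/getD are exact here
def bInner (cont : String) (rounds : List (List String)) (r : Int) : List (List String) :=
  let rounds' := if r = (rounds.length : Int) then rounds ++ [[]] else rounds
  rounds'.set r.toNat (rounds'.getD r.toNat [] ++ [cont])

-- `for cont, n in ...: for r in range(n): …` then `[c for bucket in rounds for c in bucket]`
def make_workload_alt (continent_requests : List (String × Int)) : List String :=
  (continent_requests.foldl
    (fun rounds p => (PySem.List.pyRange 0 p.2 1).foldl (bInner p.1) rounds) []).flatten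

-- ===== PRECONDITION & SPEC =====
-- the parameter is a Python dict {continent: count}: its keys are necessarily distinct;
-- association lists with duplicate keys do not arise from any dict argument
def Pre_make_workload (continent_requests : List (String × Int)) : Prop :=
  (continent_requests.map (fun p => p.1)).Nodup
instance (continent_requests : List (String × Int)) : Decidable (Pre_make_workload continent_requests) := by unfold Pre_make_workload; infer_instance

def pvWitness_make_workload : (List (String × Int)) := [("AS", 2), ("EU", 1), ("AF", 0)]

def Spec_make_workload (continent_requests : List (String × Int)) (out : List String) : Prop := out = make_workload_alt continent_requests
instance (continent_requests : List (String × Int)) (out : List String) : Decidable (Spec_make_workload continent_requests out) := by unfold Spec_make_workload; infer_instance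

-- ===== CLAIM (what is proved, stated in full; the proofs are below) =====
def Claim_equal_make_workload : Prop := ∀ (continent_requests : List (String × Int)), Dom_make_workload continent_requests → Pre_make_workload continent_requests → Spec_make_workload continent_requests (make_workload continent_requests)

-- ===== LEMMAS AND PROOFS =====

-- the common mathematical value both programs compute:
-- round r of the schedule = the continents with count > r, in input order
def roundsOf (l : List (String × Int)) (r : Nat) : List String :=
  (l.filter (fun p => decide ((r : Int) < p.2))).map (fun p => p.1)

-- number of rounds = the largest positive count
def maxC (l : List (String × Int)) : Nat := l.foldr (fun p m => max p.2.toNat m) 0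

-- ---------- A side: A's loop, seen round by round ----------

-- proof-side round-robin loop over a shrinking active list (a reference reformulation of A's loop)
def rrMeasure (l : List (String × Int)) : Nat := (l.map (fun q => q.2.toNat)).sum + l.length

def rrLoop : Nat → List String → List (String × Int) → List String
  | 0, seq, _ => seq
  | fuel+1, seq, active =>
    match active with
    | [] => seq
    | p :: t =>
        rrLoop fuel (seq ++ (p :: t).map (fun q => q.1))
              (((p :: t).filter (fun q => decide (1 < q.2))).map (fun q => (q.1, q.2 - 1)))

theorem rrNext_le (l : List (String × Int)) :
    ((l.filter (fun p => decide (1 < p.2))).map (fun p => (p.2 - 1).toNat)).sum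
      + (l.filter (fun p => decide (1 < p.2))).length
    ≤ (l.map (fun p => p.2.toNat)).sum + l.length := by
  induction l with
  | nil => simp
  | cons p t ih =>
    by_cases h : (1:Int) < p.2 <;> simp [h] at ih ⊢ <;> omega

theorem rrNext_lt (p : String × Int) (t : List (String × Int)) :
    rrMeasure (((p :: t).filter (fun q => decide (1 < q.2))).map (fun q => (q.1, q.2 - 1)))
    < rrMeasure (p :: t) := by
  have h0 := rrNext_le t
  unfold rrMeasure
  by_cases h : (1:Int) < p.2 <;> simp [h, List.map_map, Function.comp_def] at h0 ⊢ <;> omega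

-- the B-side view of A's dict: its still-active (continent, count) pairs in key order
def act (d : PySem.Dict String Int) : List (String × Int) :=
  (d.keys.filter (fun k => decide (0 < d.getD k 0))).map (fun k => (k, d.getD k 0))

theorem aRound (ks : List String) : ∀ (d : PySem.Dict String Int) (seq : List String),
    ks.Nodup → (∀ k ∈ ks, d.contains k = true) →
    (ks.foldl aStep (seq, d)).1 = seq ++ ks.filter (fun k => decide (0 < d.getD k 0))
    ∧ (ks.foldl aStep (seq, d)).2.keys = d.keys
    ∧ ∀ k, (ks.foldl aStep (seq, d)).2.getD k 0 =
        if k ∈ ks ∧ 0 < d.getD k 0 then d.getD k 0 - 1 else d.getD k 0 := by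
  induction ks with
  | nil => intro d seq _ _; simp
  | cons k0 t ih =>
    intro d seq hnd hsub
    have hk0 : d.contains k0 = true := hsub k0 (by simp)
    obtain ⟨hk0t, hndt⟩ := List.nodup_cons.mp hnd
    by_cases hp : d.getD k0 0 > 0
    · have hfold : ∀ st, (k0 :: t).foldl aStep st = t.foldl aStep (aStep st k0) := by
        intro st; rfl
      have hstep : aStep (seq, d) k0 = (seq ++ [k0], d.modify k0 0 (fun v => v - 1)) := by
        simp [aStep, hp]
      have hsub1 : ∀ k ∈ t, (d.modify k0 0 (fun v => v - 1)).contains k = true := by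
        intro k hk
        rw [PySem.Dict.contains_modify]
        simp [hsub k (by simp [hk])]
      have hkeys1 : (d.modify k0 0 (fun v => v - 1)).keys = d.keys := by
        rw [PySem.Dict.keys_modify, PySem.Dict.keys_insert_of_contains _ _ hk0]
      have hgetne : ∀ k, k ≠ k0 →
          (d.modify k0 0 (fun v => v - 1)).getD k 0 = d.getD k 0 := by
        intro k hke
        exact PySem.Dict.getD_modify_of_ne d 0 (fun v => v - 1) hke
      obtain ⟨h1, h2, h3⟩ := ih (d.modify k0 0 (fun v => v - 1)) (seq ++ [k0]) hndt hsub1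
      refine ⟨?_, ?_, ?_⟩
      · rw [hfold, hstep, h1,
          List.filter_congr (fun k hk => by rw [hgetne k (fun he => hk0t (he ▸ hk))])]
        simp [hp]
      · rw [hfold, hstep, h2, hkeys1]
      · intro k
        rw [hfold, hstep, h3 k]
        by_cases hke : k = k0
        · subst hke
          simp only [hk0t, false_and, if_false, PySem.Dict.getD_modify_self]
          simp [hp]
        · rw [hgetne k hke]
          simp [List.mem_cons, hke]
    · have hfold : (k0 :: t).foldl aStep (seq, d) = t.foldl aStep (seq, d) := by
        simp [List.foldl_cons, aStep, hp]
      obtain ⟨h1, h2, h3⟩ := ih d seq hndt (fun k hk => hsub k (by simp [hk]))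
      refine ⟨?_, ?_, ?_⟩
      · rw [hfold, h1]; simp [hp]
      · rw [hfold, h2]
      · intro k
        rw [hfold, h3 k]
        by_cases hke : k = k0
        · subst hke; simp [hk0t, hp]
        · simp [List.mem_cons, hke]

theorem rrLoop_nil (fuel : Nat) (seq : List String) : rrLoop fuel seq [] = seq := by
  cases fuel <;> rfl

theorem act_map_fst (d : PySem.Dict String Int) :
    (act d).map (fun q => q.1) = d.keys.filter (fun k => decide (0 < d.getD k 0)) := by
  simp [act, List.map_map, Function.comp_def]

theorem main_loop (fuel : Nat) : ∀ (fuel2 : Nat) (d : PySem.Dict String Int) (seq : List String),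
    d.keys.Nodup → aMeasure d < fuel → rrMeasure (act d) < fuel2 →
    aLoop fuel seq d = rrLoop fuel2 seq (act d) := by
  induction fuel with
  | zero => intro fuel2 d seq _ h _; omega
  | succ n ih =>
    intro fuel2 d seq hnd hm hm2
    obtain ⟨h1, h2, h3⟩ :=
      aRound d.keys d seq hnd (fun k hk => (PySem.Dict.contains_iff_mem_keys d k).mpr hk)
    have hvals := PySem.Dict.values_eq_map_keys d hnd (0 : Int)
    by_cases hany : d.values.any (fun v => decide (0 < v)) = true
    · obtain ⟨k0, hk0, hk0pos⟩ : ∃ k ∈ d.keys, 0 < d.getD k 0 := by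
        rcases List.any_eq_true.mp hany with ⟨v, hv, hv0⟩
        rw [hvals] at hv
        rcases List.mem_map.mp hv with ⟨k, hk, rfl⟩
        exact ⟨k, hk, by simpa using hv0⟩
      -- keys of the dict after one round, and its nodup
      have hndst : (d.keys.foldl aStep (seq, d)).2.keys.Nodup := by rw [h2]; exact hnd
      -- one A-round strictly shrinks the measure
      have hlt : aMeasure (d.keys.foldl aStep (seq, d)).2 < aMeasure d := by
        rw [aMeasure, aMeasure, PySem.Dict.values_eq_map_keys _ hndst (0 : Int),
          PySem.Dict.values_eq_map_keys d hnd (0 : Int), h2, List.map_map, List.map_map]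
        apply List.sum_lt_sum
        · intro k hk
          simp only [Function.comp_apply]
          rw [h3 k]
          split_ifs <;> omega
        · refine ⟨k0, hk0, ?_⟩
          simp only [Function.comp_apply]
          rw [h3 k0]
          simp only [hk0, hk0pos, and_self, if_true]
          omega
      -- the next active list seen from A's dict
      have hact2 : act (d.keys.foldl aStep (seq, d)).2
          = ((act d).filter (fun q => decide (1 < q.2))).map (fun q => (q.1, q.2 - 1)) := by
        have lhs : act (d.keys.foldl aStep (seq, d)).2
            = (d.keys.filter (fun k => decide (1 < d.getD k 0))).map
                (fun k => (k, d.getD k 0 - 1)) := by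
          unfold act
          rw [h2, List.filter_congr (q := fun k => decide (1 < d.getD k 0))
              (fun k hk => by rw [h3 k]; simp only [hk, true_and]; split_ifs <;>
                exact decide_eq_decide.mpr (by omega))]
          refine List.map_congr_left (fun k hk => ?_)
          rcases List.mem_filter.mp hk with ⟨hk1, hk2⟩
          rw [h3 k]
          simp only [hk1, true_and]
          have : (1:Int) < d.getD k 0 := by simpa using hk2
          rw [if_pos (by omega)]
        rw [lhs]
        unfold act
        rw [List.filter_map, List.map_map]
        simp only [Function.comp_def]
        rw [List.filter_filter]
        refine congrArg _ ?_
        refine (List.filter_congr (fun k _ => ?_)).symm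
        by_cases hq : (1:Int) < d.getD k 0
        · simp only [hq, decide_true, Bool.true_and, decide_eq_true_iff]
          omega
        · simp [hq]
      -- unfold one step on each side and recurse
      have hstep : aLoop (n+1) seq d
          = aLoop n (d.keys.foldl aStep (seq, d)).1 (d.keys.foldl aStep (seq, d)).2 := by
        simp only [aLoop, hany, if_true]
      rcases hc : act d with _ | ⟨p, t⟩
      · exfalso
        simp only [act, List.map_eq_nil_iff, List.filter_eq_nil_iff] at hc
        exact hc k0 hk0 (by simpa using hk0pos)
      · cases fuel2 with
        | zero => omega
        | succ m =>
          have hnext : rrMeasure (act (d.keys.foldl aStep (seq, d)).2) < m := by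
            have hb := rrNext_lt p t
            rw [hact2, hc]
            rw [hc] at hm2
            omega
          have hfst : (p :: t).map (fun q => q.1)
              = d.keys.filter (fun k => decide (0 < d.getD k 0)) := by
            rw [← hc, act_map_fst]
          rw [hstep, ih m _ _ hndst (by omega) hnext, h1, hact2, hc,
            show rrLoop (m+1) seq (p :: t)
                = rrLoop m (seq ++ (p :: t).map (fun q => q.1))
                    (((p :: t).filter (fun q => decide (1 < q.2))).map (fun q => (q.1, q.2 - 1)))
              from rfl,
            hfst]
    · have hz : act d = [] := by
        simp only [act, List.map_eq_nil_iff, List.filter_eq_nil_iff]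
        intro k hk
        rw [hvals] at hany
        simp only [List.any_map, List.any_eq_true, not_exists, not_and] at hany
        have := fun h => hany k hk h
        simp only [Function.comp_apply] at *
        intro hdec
        exact hany k hk (by simpa using hdec)
      rw [hz, rrLoop_nil]
      simp [aLoop, hany]

theorem act_mk (cr : List (String × Int)) (h : (cr.map (fun p => p.1)).Nodup) :
    act ⟨cr⟩ = cr.filter (fun p => decide (0 < p.2)) := by
  induction cr with
  | nil => simp [act, PySem.Dict.keys_mk]
  | cons p t ih =>
    obtain ⟨pk, pv⟩ := p
    rw [List.map_cons] at h
    obtain ⟨hp1, ht⟩ := List.nodup_cons.mp h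
    have hgethead : PySem.Dict.getD ⟨(pk, pv) :: t⟩ pk (0 : Int) = pv := by
      simp [PySem.Dict.getD_eq_get?_getD, PySem.Dict.get?_mk_cons]
    have hgettail : ∀ k, k ≠ pk →
        PySem.Dict.getD ⟨(pk, pv) :: t⟩ k (0 : Int) = PySem.Dict.getD ⟨t⟩ k 0 := by
      intro k hk
      simp [PySem.Dict.getD_eq_get?_getD, PySem.Dict.get?_mk_cons, Ne.symm hk]
    have hkeys : (PySem.Dict.mk ((pk, pv) :: t)).keys = pk :: t.map (fun q => q.1) := by
      simp [PySem.Dict.keys_mk]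
    unfold act
    rw [hkeys, List.filter_cons]
    have htail_filter : (t.map (fun q => q.1)).filter
          (fun k => decide (0 < PySem.Dict.getD ⟨(pk, pv) :: t⟩ k 0))
        = (t.map (fun q => q.1)).filter
          (fun k => decide (0 < PySem.Dict.getD ⟨t⟩ k 0)) :=
      List.filter_congr (fun k hk => by rw [hgettail k (fun he => hp1 (he ▸ hk))])
    have htail_map : ∀ l : List String, (∀ k ∈ l, k ∈ t.map (fun q => q.1)) →
        l.map (fun k => (k, PySem.Dict.getD ⟨(pk, pv) :: t⟩ k (0 : Int)))
        = l.map (fun k => (k, PySem.Dict.getD ⟨t⟩ k 0)) := by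
      intro l hl
      exact List.map_congr_left
        (fun k hk => by rw [hgettail k (fun he => hp1 (he ▸ hl k hk))])
    have hih : ((t.map (fun q => q.1)).filter
          (fun k => decide (0 < PySem.Dict.getD ⟨t⟩ k 0))).map
          (fun k => (k, PySem.Dict.getD ⟨t⟩ k (0 : Int)))
        = t.filter (fun q => decide (0 < q.2)) := by
      simpa [act, PySem.Dict.keys_mk] using ih ht
    by_cases hp : (0:Int) < pv
    · rw [if_pos (by simpa [hgethead] using hp)]
      rw [List.map_cons, hgethead, htail_filter,
        htail_map _ (fun k hk => (List.mem_filter.mp hk).1), hih]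
      simp [hp]
    · rw [if_neg (by simpa [hgethead] using hp)]
      rw [htail_filter, htail_map _ (fun k hk => (List.mem_filter.mp hk).1), hih]
      simp [hp]

-- ---------- rrLoop computes the flattened rounds ----------

theorem roundsOf_next (l : List (String × Int)) (r : Nat) :
    roundsOf ((l.filter (fun q => decide (1 < q.2))).map (fun q => (q.1, q.2 - 1))) r
      = roundsOf l (r + 1) := by
  unfold roundsOf
  rw [List.filter_map, List.map_map, List.filter_filter]
  refine congrArg _ (List.filter_congr (fun q _ => ?_))
  simp only [Function.comp_apply, ← Bool.decide_and]
  refine decide_eq_decide.mpr ?_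
  push_cast
  omega

theorem roundsOf_zero_of_pos (l : List (String × Int)) (h : ∀ p ∈ l, 0 < p.2) :
    roundsOf l 0 = l.map (fun p => p.1) := by
  unfold roundsOf
  rw [List.filter_eq_self.mpr (fun p hp => by simpa using h p hp)]

theorem maxC_cons (p : String × Int) (t : List (String × Int)) :
    maxC (p :: t) = max p.2.toNat (maxC t) := rfl

theorem maxC_next_le (l : List (String × Int)) :
    maxC ((l.filter (fun q => decide (1 < q.2))).map (fun q => (q.1, q.2 - 1))) + 1
      ≤ max 1 (maxC l) := by
  induction l with
  | nil => simp [maxC]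
  | cons p t ih =>
    by_cases h : (1:Int) < p.2
    · rw [List.filter_cons_of_pos (by simpa using h), List.map_cons, maxC_cons, maxC_cons]
      have h2 : ((p.1, p.2 - 1) : String × Int).2.toNat = p.2.toNat - 1 := by
        show (p.2 - 1).toNat = p.2.toNat - 1
        omega
      have h3 : 1 ≤ p.2.toNat := by omega
      rw [h2]
      omega
    · rw [List.filter_cons_of_neg (by simpa using h), maxC_cons]
      omega

theorem rr_flatten (fuel : Nat) : ∀ (active : List (String × Int)) (seq : List String) (N : Nat),
    rrMeasure active < fuel → maxC active ≤ N → (∀ p ∈ active, 0 < p.2) →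
    rrLoop fuel seq active = seq ++ ((List.range N).map (roundsOf active)).flatten := by
  induction fuel with
  | zero => intro active seq N h _ _; omega
  | succ n ih =>
    intro active seq N hm hN hpos
    rcases active with _ | ⟨p, t⟩
    · rw [rrLoop_nil]
      have hz : roundsOf ([] : List (String × Int)) = fun _ => [] :=
        funext (fun r => by simp [roundsOf])
      rw [hz]
      simp
    · have hp1 : 0 < p.2 := hpos p (by simp)
      have hmaxge : 1 ≤ maxC (p :: t) := by
        rw [maxC_cons, Nat.max_def]
        split_ifs <;> omega
      rcases N with _ | M
      · omega
      have hnextpos : ∀ q ∈ ((p :: t).filter (fun q => decide (1 < q.2))).map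
          (fun q => (q.1, q.2 - 1)), 0 < q.2 := by
        intro q hq
        rcases List.mem_map.mp hq with ⟨q0, hq0, rfl⟩
        have := (List.mem_filter.mp hq0).2
        simp only [decide_eq_true_iff] at this
        simp
        omega
      have hnextmax : maxC (((p :: t).filter (fun q => decide (1 < q.2))).map
          (fun q => (q.1, q.2 - 1))) ≤ M := by
        have h1 := maxC_next_le (p :: t)
        rw [Nat.max_eq_right hmaxge] at h1
        omega
      have hrec := ih (((p :: t).filter (fun q => decide (1 < q.2))).map
          (fun q => (q.1, q.2 - 1)))
          (seq ++ (p :: t).map (fun q => q.1)) M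
          (by have := rrNext_lt p t; omega) hnextmax hnextpos
      have hroundsfun : roundsOf (((p :: t).filter (fun q => decide (1 < q.2))).map
          (fun q => (q.1, q.2 - 1))) = fun r => roundsOf (p :: t) (r + 1) :=
        funext (fun r => roundsOf_next (p :: t) r)
      rw [show rrLoop (n+1) seq (p :: t)
            = rrLoop n (seq ++ (p :: t).map (fun q => q.1))
                (((p :: t).filter (fun q => decide (1 < q.2))).map (fun q => (q.1, q.2 - 1)))
          from rfl,
        hrec, hroundsfun, List.range_succ_eq_map]
      simp [Function.comp_def, roundsOf_zero_of_pos (p :: t) hpos, List.append_assoc]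

theorem roundsOf_filter_pos (l : List (String × Int)) :
    roundsOf (l.filter (fun p => decide (0 < p.2))) = roundsOf l := by
  funext r
  unfold roundsOf
  rw [List.filter_filter]
  refine congrArg _ (List.filter_congr (fun q _ => ?_))
  simp only [← Bool.decide_and]
  refine decide_eq_decide.mpr ?_
  omega

theorem maxC_filter_le (l : List (String × Int)) (q : String × Int → Bool) :
    maxC (l.filter q) ≤ maxC l := by
  induction l with
  | nil => simp [maxC]
  | cons p t ih =>
    by_cases h : q p
    · rw [List.filter_cons_of_pos h, maxC_cons, maxC_cons]
      omega
    · rw [List.filter_cons_of_neg h, maxC_cons]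
      omega

-- A's output = flatten of the rounds
theorem a_eq_flatten (cr : List (String × Int)) (h : (cr.map (fun p => p.1)).Nodup) :
    make_workload cr = ((List.range (maxC cr)).map (roundsOf cr)).flatten := by
  unfold make_workload
  have hact := act_mk cr h
  rw [main_loop (aMeasure ⟨cr⟩ + 1) (rrMeasure (cr.filter (fun p => decide (0 < p.2))) + 1)
      ⟨cr⟩ [] (by simpa [PySem.Dict.keys_mk] using h) (Nat.lt_succ_self _)
      (by rw [hact]; omega), hact,
    rr_flatten _ _ _ (maxC cr) (Nat.lt_succ_self _)
      (maxC_filter_le cr _)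
      (fun p hp => by simpa using (List.mem_filter.mp hp).2),
    roundsOf_filter_pos, List.nil_append]

-- ---------- B side: the bucket fold builds exactly the rounds ----------

-- the inner fold over range(n): appends cont to buckets 0..m-1, extending the list to length m
theorem b_inner (c : String) (m : Nat) : ∀ (R : List (List String)),
    (((List.range m).map (fun (k : Nat) => (k : Int))).foldl (bInner c) R).length = max R.length m
    ∧ ∀ r : Nat, (((List.range m).map (fun (k : Nat) => (k : Int))).foldl (bInner c) R).getD r []
        = if r < m then R.getD r [] ++ [c] else R.getD r [] := by
  induction m with
  | zero => intro R; simp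
  | succ m ih =>
    intro R
    obtain ⟨ihl, ihg⟩ := ih R
    set S := ((List.range m).map (fun (k : Nat) => (k : Int))).foldl (bInner c) R with hS
    have hfold : ((List.range (m+1)).map (fun (k : Nat) => (k : Int))).foldl (bInner c) R
        = bInner c S (m : Int) := by
      rw [List.range_succ, List.map_append, List.foldl_append]; rfl
    have hget : ∀ (L : List (List String)) (r : Nat), L.getD r [] = (L[r]?).getD [] := by
      intro L r; rw [List.getD_eq_getElem?_getD]
    by_cases hc : (m : Int) = (S.length : Int)
    · -- extension fires: S.length = m (so R.length ≤ m)
      have hlen : S.length = m := by exact_mod_cast hc.symm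
      have hRle : R.length ≤ m := by
        have h1 := ihl
        rw [hlen] at h1
        omega
      have hb : bInner c S (m : Int) = (S ++ [[]]).set m ((S ++ [[]]).getD m [] ++ [c]) := by
        simp only [bInner, Int.toNat_natCast]
        rw [if_pos hc]
      have hgm : (S ++ [[]]).getD m [] = [] := by
        rw [hget, List.getElem?_append_right (by omega), hlen]
        simp
      constructor
      · rw [hfold, hb, List.length_set, List.length_append, hlen, List.length_singleton,
          Nat.max_eq_right (by omega)]
      · intro r
        rw [hfold, hb, hgm, List.nil_append, hget, List.getElem?_set]
        by_cases hr : r = m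
        · rw [hr, if_pos rfl, if_pos (by rw [List.length_append, hlen]; simp),
            if_pos (by omega)]
          rw [hget, List.getElem?_eq_none (show R.length ≤ m by omega)]
          rfl
        · rw [if_neg (fun he => hr he.symm)]
          by_cases hrm : r < m
          · rw [List.getElem?_append_left (by omega), ← hget, ihg r, if_pos hrm,
              if_pos (by omega)]
          · rw [if_neg (by omega), List.getElem?_eq_none
                (by rw [List.length_append, hlen, List.length_singleton]; omega)]
            rw [hget, List.getElem?_eq_none (show R.length ≤ r by omega)]
    · -- no extension: S.length = max R.length m ≠ m, so m < R.length
      have hmlt : m < R.length := by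
        rcases Nat.lt_or_ge m R.length with h | h
        · exact h
        · exfalso
          exact hc (by rw [ihl, Nat.max_eq_right h])
      have hlen : S.length = R.length := by rw [ihl, Nat.max_eq_left (by omega)]
      have hb : bInner c S (m : Int) = S.set m (S.getD m [] ++ [c]) := by
        simp only [bInner, Int.toNat_natCast]
        rw [if_neg hc]
      constructor
      · rw [hfold, hb, List.length_set, hlen, Nat.max_eq_left (by omega)]
      · intro r
        rw [hfold, hb, hget, List.getElem?_set]
        by_cases hr : r = m
        · rw [hr, if_pos rfl, if_pos (by omega), ihg m, if_neg (by omega), if_pos (by omega)]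
          rfl
        · rw [if_neg (fun he => hr he.symm), ← hget, ihg r]
          by_cases hrm : r < m
          · rw [if_pos hrm, if_pos (by omega)]
          · rw [if_neg hrm, if_neg (by omega)]

-- pyRange 0 n 1 is range n.toNat
theorem pyRange_cast (n : Int) :
    PySem.List.pyRange 0 n 1 = (List.range n.toNat).map (fun (k : Nat) => (k : Int)) := by
  rw [PySem.List.pyRange_one]
  simp

-- the outer fold over the input list
theorem b_outer (l : List (String × Int)) : ∀ (R : List (List String)),
    (l.foldl (fun rounds p => (PySem.List.pyRange 0 p.2 1).foldl (bInner p.1) rounds) R).length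
      = max R.length (maxC l)
    ∧ ∀ r : Nat,
      (l.foldl (fun rounds p => (PySem.List.pyRange 0 p.2 1).foldl (bInner p.1) rounds) R).getD r []
        = R.getD r [] ++ roundsOf l r := by
  induction l with
  | nil => intro R; simp [maxC, roundsOf]
  | cons p t ih =>
    intro R
    have hfold : (p :: t).foldl
          (fun rounds q => (PySem.List.pyRange 0 q.2 1).foldl (bInner q.1) rounds) R
        = t.foldl (fun rounds q => (PySem.List.pyRange 0 q.2 1).foldl (bInner q.1) rounds)
            ((PySem.List.pyRange 0 p.2 1).foldl (bInner p.1) R) := rfl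
    rw [hfold, pyRange_cast]
    obtain ⟨hl1, hg1⟩ := b_inner p.1 p.2.toNat R
    obtain ⟨hl2, hg2⟩ := ih (((List.range p.2.toNat).map (fun (k : Nat) => (k : Int))).foldl (bInner p.1) R)
    constructor
    · rw [hl2, hl1, maxC_cons, Nat.max_assoc]
    · intro r
      rw [hg2 r, hg1 r]
      have hro : roundsOf (p :: t) r
          = (if r < p.2.toNat then [p.1] else []) ++ roundsOf t r := by
        unfold roundsOf
        rw [List.filter_cons]
        by_cases h : (r : Int) < p.2
        · rw [if_pos (by simpa using h), if_pos (by omega), List.map_cons, List.cons_append,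
            List.nil_append]
        · rw [if_neg (by simpa using h), if_neg (by omega), List.nil_append]
      rw [hro]
      by_cases h : r < p.2.toNat <;> simp [h, List.append_assoc]

-- any list is (range its length).map of its getD
theorem list_eq_range_map (L : List (List String)) :
    L = (List.range L.length).map (fun r => L.getD r []) := by
  refine List.ext_getElem (by simp) (fun i h1 h2 => ?_)
  simp only [List.getElem_map, List.getElem_range]
  rw [List.getD_eq_getElem L [] h1]

-- B's output = flatten of the rounds
theorem b_eq_flatten (cr : List (String × Int)) :
    make_workload_alt cr = ((List.range (maxC cr)).map (roundsOf cr)).flatten := by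
  unfold make_workload_alt
  obtain ⟨hl, hg⟩ := b_outer cr []
  set F := cr.foldl (fun rounds p => (PySem.List.pyRange 0 p.2 1).foldl (bInner p.1) rounds) []
    with hF
  have hlen : F.length = maxC cr := by simpa using hl
  have hgetD : ∀ r : Nat, F.getD r [] = roundsOf cr r := by
    intro r
    rw [hg r]
    rfl
  calc F.flatten = ((List.range F.length).map (fun r => F.getD r [])).flatten := by
        rw [← list_eq_range_map]
    _ = ((List.range (maxC cr)).map (roundsOf cr)).flatten := by
        rw [hlen]
        exact congrArg _ (List.map_congr_left (fun r _ => hgetD r))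

-- ===== VERDICT (by name: the statement is the Claim_ definition above) =====
theorem make_workload_spec : Claim_equal_make_workload := by
  intro cr _dom hpre
  unfold Spec_make_workload
  rw [a_eq_flatten cr hpre, b_eq_flatten cr]
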